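-- pv_equiv track=rewrite | github.com/Aryudesu/myLibrary | math/ramanujanTau.py | calc
-- ===== SOURCE A (Python) =====
-- def calc_pascal_triangle(num):
--     dp = [1]
--     for i in range(num):
--         new_dp = [1] + [dp[j] + dp[j + 1] for j in range(len(dp) - 1)] + [1]
--         dp = new_dp
--     return dp
--
-- def calc(num):
--     ta = calc_pascal_triangle(24)
--     lta = len(ta)
--     dp = {0: 1}  # 初期状態
--     for n in range(1, num + 1):
--         new_dp = {}
--         for d, dp_value in dp.items():
--             sgn = 1
--             for idx in range(lta):
--                 key = d + n * idx
--                 if key > num:  # 範囲外になったら終了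
--                     break
--                 new_dp[key] = new_dp.get(key, 0) + sgn * dp_value * ta[idx]
--                 sgn = -sgn
--         dp = new_dp  # 更新
--     # 結果リストを生成
--     return [dp.get(i, 0) for i in range(num + 1)]
-- ===== SOURCE B (Python) =====
-- def calc(num):
--     if num < 0:
--         return []
--     a = [1] + [0] * num
--     for n in range(1, num + 1):
--         for _ in range(24):
--             a = [a[i] - (a[i - n] if i >= n else 0) for i in range(num + 1)]
--     return a
-- ===== Notes on version B (the rewrite author's own statement) =====
-- stated objective: simpler
-- what changed: A expands (1-q^n)^24 with a precomputed Pascal-triangle row and scatters signed binomial contributions into a dict keyed by degree; B keeps a plain dense coefficient list of length num+1 and simply multiplies it by (1-q^n) twenty-four times for each n, with no binomial coefficients and no dict.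
import Mathlib
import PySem

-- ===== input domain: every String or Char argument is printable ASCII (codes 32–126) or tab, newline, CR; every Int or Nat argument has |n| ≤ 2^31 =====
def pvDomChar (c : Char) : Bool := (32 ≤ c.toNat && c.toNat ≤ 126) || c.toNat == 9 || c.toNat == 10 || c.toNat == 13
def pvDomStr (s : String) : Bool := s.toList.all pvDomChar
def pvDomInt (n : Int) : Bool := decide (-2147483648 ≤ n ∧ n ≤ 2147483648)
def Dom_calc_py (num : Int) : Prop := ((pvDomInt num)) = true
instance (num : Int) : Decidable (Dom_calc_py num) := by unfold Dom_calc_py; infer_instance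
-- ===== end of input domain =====

-- B replaces A's dict-of-coefficients scatter with the 24-fold binomial row by a plain dense
-- list multiplied by (1 - q^n) twenty-four times per n: shorter and simpler, same exact values.

-- ===== PORT A =====
-- calc_pascal_triangle
def pascalRow (num : Int) : List Int :=
  (PySem.List.pyRange 0 num 1).foldl (fun dp _ =>
    [1] ++ (PySem.List.pyRange 0 ((PySem.List.len dp) - 1) 1).map
      (fun j => PySem.List.pyGetD dp j 0 + PySem.List.pyGetD dp (j+1) 0) ++ [1]) [1]

-- the inner 'for idx in range(lta)' loop with its break, carrying sgn; nd is new_dp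
def calcInner (num n d v : Int) (ta : List Int) : List Int → Int → PySem.Dict Int Int → PySem.Dict Int Int
  | [], _, nd => nd
  | idx :: rest, sgn, nd =>
    let key := d + n * idx
    if key > num then nd
    else calcInner num n d v ta rest (-sgn)
           (nd.insert key (nd.getD key 0 + sgn * v * PySem.List.pyGetD ta idx 0))

def calc_py (num : Int) : List Int :=
  let ta := pascalRow 24
  let lta : Int := PySem.List.len ta
  let dp := (PySem.List.pyRange 1 (num+1) 1).foldl
    (fun dp n => dp.items.foldl
        (fun nd p => calcInner num n p.1 p.2 ta (PySem.List.pyRange 0 lta 1) 1 nd)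
        PySem.Dict.empty)
    (PySem.Dict.empty.insert 0 1)
  (PySem.List.pyRange 0 (num+1) 1).map (fun i => dp.getD i 0)

-- ===== PORT B =====
def calc_py_alt (num : Int) : List Int :=
  if num < 0 then []
  else
    (PySem.List.pyRange 1 (num+1) 1).foldl (fun a n =>
      (List.range 24).foldl (fun a _ =>
        (PySem.List.pyRange 0 (num+1) 1).map (fun i =>
          PySem.List.pyGetD a i 0 - (if n ≤ i then PySem.List.pyGetD a (i-n) 0 else 0))) a)
      (1 :: List.replicate num.toNat 0)

-- ===== PRECONDITION & SPEC =====
def Spec_calc_py (num : Int) (out : List Int) : Prop := out = calc_py_alt num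
instance (num : Int) (out : List Int) : Decidable (Spec_calc_py num out) := by unfold Spec_calc_py; infer_instance

-- ===== CLAIM =====
def Claim_equal_calc_py : Prop := ∀ (num : Int), Dom_calc_py num → Spec_calc_py num (calc_py num)

-- ===== LEMMAS AND PROOFS =====

-- the common coefficient model: f k = k-th coefficient; tstep multiplies by (1 - q^n), truncated to degree num
def tDelta : Int → Int := fun k => if k = 0 then 1 else 0
def tstep (num n : Int) (f : Int → Int) : Int → Int :=
  fun k => if 0 ≤ k ∧ k ≤ num then f k - f (k - n) else 0
def Supp (num : Int) (f : Int → Int) : Prop := ∀ k, k < 0 ∨ num < k → f k = 0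

theorem supp_tstep (num n : Int) (f : Int → Int) : Supp num (tstep num n f) := by
  intro k hk; unfold tstep; rw [if_neg]; omega

theorem supp_iterate (num n : Int) (f : Int → Int) (hf : Supp num f) (m : ℕ) :
    Supp num ((tstep num n)^[m] f) := by
  induction m with
  | zero => exact hf
  | succ m ih => rw [Function.iterate_succ_apply']; exact supp_tstep num n _

theorem supp_tDelta (num : Int) (h : 0 ≤ num) : Supp num tDelta := by
  intro k hk; unfold tDelta; rw [if_neg]; omega

-- (1 - q^n)^m expanded: m truncated multiplications by (1 - q^n) are the signed binomial row
theorem binom (num n : Int) (f : Int → Int) (hf : Supp num f) (hn : 1 ≤ n) :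
    ∀ (m : ℕ) (k : Int), 0 ≤ k → k ≤ num →
      (tstep num n)^[m] f k
        = ∑ i ∈ Finset.range (m+1), (-1:Int)^i * (Nat.choose m i : Int) * f (k - n*i) := by
  intro m
  induction m with
  | zero => intro k hk0 hk; simp
  | succ m ih =>
    intro k hk0 hk
    rw [Function.iterate_succ_apply']
    show (if 0 ≤ k ∧ k ≤ num then (tstep num n)^[m] f k - (tstep num n)^[m] f (k - n) else 0) = _
    rw [if_pos (show 0 ≤ k ∧ k ≤ num from ⟨hk0, hk⟩), ih k hk0 hk]
    have hSkn : (tstep num n)^[m] f (k - n)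
        = ∑ i ∈ Finset.range (m+1), (-1:Int)^i * (Nat.choose m i : Int) * f (k - n - n*i) := by
      by_cases h0 : 0 ≤ k - n
      · exact ih (k-n) h0 (by omega)
      · rw [supp_iterate num n f hf m (k-n) (Or.inl (by omega))]
        symm
        apply Finset.sum_eq_zero
        intro i _
        have h1 : (0:Int) ≤ n * i := mul_nonneg (by omega) (by positivity)
        rw [hf (k - n - n*i) (Or.inl (by omega))]
        ring
    rw [hSkn]
    rw [Finset.sum_range_succ' (fun i => (-1:Int)^i * (Nat.choose m i : Int) * f (k - n*i)) m,
        Finset.sum_range_succ' (fun i => (-1:Int)^i * (Nat.choose (m+1) i : Int) * f (k - n*i)) (m+1)]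
    have e2 : (∑ i ∈ Finset.range m, (-1:Int)^(i+1) * (Nat.choose m (i+1) : Int) * f (k - n*(((i+1):ℕ):Int)))
        = ∑ i ∈ Finset.range (m+1), (-1:Int)^(i+1) * (Nat.choose m (i+1) : Int) * f (k - n*(((i+1):ℕ):Int)) := by
      rw [Finset.sum_range_succ, Nat.choose_eq_zero_of_lt (by omega)]
      push_cast; ring
    rw [e2]
    have e3 : (∑ i ∈ Finset.range (m+1), (-1:Int)^(i+1) * (Nat.choose m (i+1) : Int) * f (k - n*(((i+1):ℕ):Int)))
        - (∑ i ∈ Finset.range (m+1), (-1:Int)^i * (Nat.choose m i : Int) * f (k - n - n*(i:Int)))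
        = ∑ i ∈ Finset.range (m+1), (-1:Int)^(i+1) * (Nat.choose (m+1) (i+1) : Int) * f (k - n*(((i+1):ℕ):Int)) := by
      rw [← Finset.sum_sub_distrib]
      apply Finset.sum_congr rfl
      intro i _
      have h1 : k - n - n*(i:Int) = k - n*(((i+1):ℕ):Int) := by push_cast; ring
      rw [h1, Nat.choose_succ_succ m i]
      push_cast; ring
    have e4 : (-1:Int)^0 * (Nat.choose m 0 : Int) * f (k - n*((0:ℕ):Int))
        = (-1:Int)^0 * (Nat.choose (m+1) 0 : Int) * f (k - n*((0:ℕ):Int)) := by norm_num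
    linarith [e3, e4]

-- ===== B-side: each pass of the comprehension is one tstep =====
theorem init_list (num : Int) (h : 0 ≤ num) :
    (1 :: List.replicate num.toNat 0 : List Int) = (PySem.List.pyRange 0 (num+1) 1).map tDelta := by
  rw [PySem.List.pyRange_one]
  have h1 : ((num+1)-0).toNat = num.toNat + 1 := by omega
  rw [h1, List.map_map, List.range_succ_eq_map, List.map_cons]
  have h2 : (tDelta ∘ fun k : ℕ => (0:Int) + ↑k) 0 = 1 := by simp [tDelta]
  rw [h2, List.map_map]
  congr 1
  have h3 : ∀ x ∈ List.range num.toNat, ((tDelta ∘ fun k : ℕ => (0:Int) + ↑k) ∘ Nat.succ) x = 0 := by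
    intro x _; simp [tDelta]; omega
  rw [List.map_congr_left h3]
  simp [List.map_const']

theorem onePass_map (num n : Int) (f : Int → Int) (hn : 1 ≤ n) (hf : Supp num f) :
    (PySem.List.pyRange 0 (num+1) 1).map (fun i =>
        PySem.List.pyGetD ((PySem.List.pyRange 0 (num+1) 1).map f) i 0 -
          (if n ≤ i then PySem.List.pyGetD ((PySem.List.pyRange 0 (num+1) 1).map f) (i-n) 0 else 0))
      = (PySem.List.pyRange 0 (num+1) 1).map (tstep num n f) := by
  apply List.map_congr_left
  intro i hi
  rw [PySem.List.mem_pyRange_one] at hi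
  rw [PySem.List.pyGetD_map_pyRange_of_nonneg f (num+1) i 0 hi.1 hi.2]
  unfold tstep
  by_cases hni : n ≤ i
  · rw [if_pos hni, PySem.List.pyGetD_map_pyRange_of_nonneg f (num+1) (i-n) 0 (by omega) (by omega),
      if_pos (show 0 ≤ i ∧ i ≤ num by omega)]
  · rw [if_neg hni, if_pos (show 0 ≤ i ∧ i ≤ num by omega), hf (i-n) (Or.inl (by omega))]

theorem pass24 (num n : Int) (f : Int → Int) (hn : 1 ≤ n) (hf : Supp num f) (m : ℕ) :
    (List.range m).foldl (fun a _ =>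
        (PySem.List.pyRange 0 (num+1) 1).map (fun i =>
          PySem.List.pyGetD a i 0 - (if n ≤ i then PySem.List.pyGetD a (i-n) 0 else 0)))
      ((PySem.List.pyRange 0 (num+1) 1).map f)
    = (PySem.List.pyRange 0 (num+1) 1).map ((tstep num n)^[m] f) := by
  induction m with
  | zero => simp
  | succ m ih =>
    rw [List.range_succ, List.foldl_append, ih, List.foldl_cons, List.foldl_nil]
    rw [onePass_map num n _ hn (supp_iterate num n f hf m), Function.iterate_succ_apply']

theorem B_fold (num : Int) :
    ∀ (L : List Int), (∀ x ∈ L, 1 ≤ x) → ∀ (f : Int → Int), Supp num f →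
    L.foldl (fun a n =>
        (List.range 24).foldl (fun a _ =>
          (PySem.List.pyRange 0 (num+1) 1).map (fun i =>
            PySem.List.pyGetD a i 0 - (if n ≤ i then PySem.List.pyGetD a (i-n) 0 else 0))) a)
      ((PySem.List.pyRange 0 (num+1) 1).map f)
    = (PySem.List.pyRange 0 (num+1) 1).map (L.foldl (fun f n => (tstep num n)^[24] f) f) := by
  intro L
  induction L with
  | nil => intro _ f _; rfl
  | cons n L ih =>
    intro hL f hf
    rw [List.foldl_cons, pass24 num n f (hL n (by simp)) hf 24, List.foldl_cons]
    exact ih (fun x hx => hL x (by simp [hx])) _ (supp_iterate num n f hf 24)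

-- ===== A-side: the dict scatter step is the same 24-fold tstep =====
def InvA (num : Int) (D : PySem.Dict Int Int) (f : Int → Int) : Prop :=
  D.keys.Nodup ∧ (∀ k ∈ D.keys, 0 ≤ k ∧ k ≤ num) ∧ (∀ k, D.getD k 0 = f k)

theorem invA_supp (num : Int) (D : PySem.Dict Int Int) (f : Int → Int) (h : InvA num D f) :
    Supp num f := by
  intro k hk
  rw [← h.2.2 k]
  apply PySem.Dict.getD_of_not_contains
  cases hc : D.contains k
  · rfl
  · exact absurd (h.2.1 k ((PySem.Dict.contains_iff_mem_keys D k).mp hc)) (by omega)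

-- the contribution of one dict item (d, v), mirroring calcInner's recursion and break
def inSum (num n d v : Int) (ta : List Int) : List Int → Int → Int → Int
  | [], _, _ => 0
  | idx :: rest, sgn, k =>
    if d + n * idx > num then 0
    else (if k = d + n * idx then sgn * v * PySem.List.pyGetD ta idx 0 else 0)
           + inSum num n d v ta rest (-sgn) k

theorem calcInner_getD (num n d v : Int) (ta : List Int) :
    ∀ (L : List Int) (sgn : Int) (nd : PySem.Dict Int Int) (k : Int),
      (calcInner num n d v ta L sgn nd).getD k 0 = nd.getD k 0 + inSum num n d v ta L sgn k := by
  intro L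
  induction L with
  | nil => intro sgn nd k; simp [calcInner, inSum]
  | cons idx rest ih =>
    intro sgn nd k
    simp only [calcInner, inSum]
    by_cases hbig : d + n * idx > num
    · rw [if_pos hbig, if_pos hbig]; ring
    · rw [if_neg hbig, if_neg hbig, ih]
      rw [PySem.Dict.getD_insert]
      split_ifs with h
      · subst h; ring
      · ring

theorem calcInner_keys (num n d v : Int) (ta : List Int) (hd : 0 ≤ d) (hn : 0 ≤ n) :
    ∀ (L : List Int), (∀ x ∈ L, 0 ≤ x) → ∀ (sgn : Int) (nd : PySem.Dict Int Int),
      (∀ k ∈ nd.keys, 0 ≤ k ∧ k ≤ num) →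
      ∀ k ∈ (calcInner num n d v ta L sgn nd).keys, 0 ≤ k ∧ k ≤ num := by
  intro L
  induction L with
  | nil => intro _ sgn nd hnd k hk; exact hnd k hk
  | cons idx rest ih =>
    intro hL sgn nd hnd k hk
    simp only [calcInner] at hk
    by_cases hbig : d + n * idx > num
    · rw [if_pos hbig] at hk; exact hnd k hk
    · rw [if_neg hbig] at hk
      refine ih (fun x hx => hL x (by simp [hx])) (-sgn) _ ?_ k hk
      intro k' hk'
      rw [PySem.Dict.mem_keys_insert] at hk'
      rcases hk' with h | h
      · subst h
        constructor
        · have : 0 ≤ n * idx := mul_nonneg hn (hL idx (by simp))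
          omega
        · omega
      · exact hnd k' h

theorem calcInner_nodup (num n d v : Int) (ta : List Int) :
    ∀ (L : List Int) (sgn : Int) (nd : PySem.Dict Int Int),
      nd.keys.Nodup → (calcInner num n d v ta L sgn nd).keys.Nodup := by
  intro L
  induction L with
  | nil => intro sgn nd h; exact h
  | cons idx rest ih =>
    intro sgn nd h
    simp only [calcInner]
    by_cases hbig : d + n * idx > num
    · rw [if_pos hbig]; exact h
    · rw [if_neg hbig]
      exact ih _ _ (PySem.Dict.nodup_keys_insert _ _ _ h)

theorem inSum_eq (num n d v k : Int) (ta : List Int) (hn : 1 ≤ n) (hk : k ≤ num) :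
    ∀ (m j : ℕ),
      inSum num n d v ta ((List.range m).map (fun t => ((j+t : ℕ) : Int))) ((-1:Int)^j) k
        = ∑ t ∈ Finset.range m,
            (if k = d + n*((j+t : ℕ) : Int)
             then (-1:Int)^(j+t) * v * PySem.List.pyGetD ta ((j+t:ℕ):Int) 0 else 0) := by
  intro m
  induction m with
  | zero => intro j; simp [inSum]
  | succ m ih =>
    intro j
    rw [List.range_succ_eq_map, List.map_cons, List.map_map]
    have hfun : ((fun t => ((j+t : ℕ) : Int)) ∘ Nat.succ) = (fun t => (((j+1)+t : ℕ) : Int)) := by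
      funext t; simp; ring
    rw [hfun]
    simp only [inSum, Nat.add_zero]
    rw [Finset.sum_range_succ']
    by_cases hbig : d + n * (j : ℕ) > num
    · rw [if_pos (by exact_mod_cast hbig)]
      symm
      have hz : ∀ i : ℕ, (if k = d + n*(((j+i) : ℕ) : Int)
             then (-1:Int)^(j+i) * v * PySem.List.pyGetD ta ((j+i:ℕ):Int) 0 else 0) = 0 := by
        intro i
        rw [if_neg]
        intro hkk
        have h1 : (0:Int) ≤ n * i := mul_nonneg (by omega) (by positivity)
        have h2 : (d + n * ((j:ℕ):Int)) + n * i = d + n * (((j+i):ℕ):Int) := by push_cast; ring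
        omega
      rw [Finset.sum_congr rfl (fun i _ => hz (i+1)), hz 0]
      simp
    · rw [if_neg (by exact_mod_cast hbig)]
      have : -(-1:Int)^j = (-1)^(j+1) := by ring
      rw [this, ih (j+1)]
      have e1 : (∑ t ∈ Finset.range m,
            (if k = d + n*(((j+1)+t : ℕ) : Int)
             then (-1:Int)^((j+1)+t) * v * PySem.List.pyGetD ta (((j+1)+t:ℕ):Int) 0 else 0))
          = ∑ t ∈ Finset.range m,
            (if k = d + n*((j+(t+1) : ℕ) : Int)
             then (-1:Int)^(j+(t+1)) * v * PySem.List.pyGetD ta ((j+(t+1):ℕ):Int) 0 else 0) := by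
        apply Finset.sum_congr rfl
        intro t _
        have h2 : (j+1)+t = j+(t+1) := by omega
        rw [h2]
      rw [e1]
      have e2 : (if k = d + n * ((j:ℕ):Int) then (-1:Int)^j * v * PySem.List.pyGetD ta ((j:ℕ):Int) 0 else 0)
          = (if k = d + n*(((j+0):ℕ):Int) then (-1:Int)^(j+0) * v * PySem.List.pyGetD ta (((j+0):ℕ):Int) 0 else 0) := by
        norm_num
      rw [e2]
      ring

theorem list_sum_finset_sum {α : Type} (L : List α) (N : ℕ) (g : α → ℕ → Int) :
    (L.map (fun p => ∑ i ∈ Finset.range N, g p i)).sum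
      = ∑ i ∈ Finset.range N, (L.map (fun p => g p i)).sum := by
  induction L with
  | nil => simp
  | cons p L ih => simp [ih, Finset.sum_add_distrib]

theorem sum_key_match (f : Int → Int) (c w : Int) :
    ∀ (L : List (Int × Int)), (L.map Prod.fst).Nodup → (∀ p ∈ L, p.2 = f p.1) →
      (c ∉ L.map Prod.fst → f c = 0) →
      (L.map (fun p => if p.1 = c then w * p.2 else 0)).sum = w * f c := by
  intro L
  induction L with
  | nil => intro _ _ hout; simp [hout (by simp)]
  | cons p L ih =>
    intro hnd hv hout
    simp only [List.map_cons, List.sum_cons]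
    by_cases hp : p.1 = c
    · rw [if_pos hp]
      have hrest : (L.map (fun p => if p.1 = c then w * p.2 else 0)).sum = 0 := by
        apply List.sum_eq_zero
        intro x hx
        simp only [List.mem_map] at hx
        obtain ⟨q, hq, rfl⟩ := hx
        rw [if_neg]
        intro hqc
        have : p.1 ∉ L.map Prod.fst := (List.nodup_cons.mp hnd).1
        exact this (by rw [hp, ← hqc]; exact List.mem_map_of_mem hq)
      rw [hrest, hv p (by simp), hp]; ring
    · rw [if_neg hp, zero_add]
      apply ih (List.nodup_cons.mp hnd).2 (fun q hq => hv q (by simp [hq]))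
      intro hc
      apply hout
      simp only [List.map_cons, List.mem_cons]
      rintro (h | h)
      · exact hp h.symm
      · exact hc h

set_option maxRecDepth 40000 in
theorem ta_eq : pascalRow 24 = (List.range 25).map (fun i => ((Nat.choose 24 i : Nat) : Int)) := by decide

theorem taChoose (i : ℕ) (hi : i < 25) :
    PySem.List.pyGetD (pascalRow 24) (i : Int) 0 = (Nat.choose 24 i : Int) := by
  rw [PySem.List.pyGetD_natCast, ta_eq]
  simp [List.getD, hi]

theorem pyRange025 : PySem.List.pyRange 0 25 1 = (List.range 25).map (fun t => ((0+t : ℕ) : Int)) := by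
  decide

theorem foldl_items_getD (num n : Int) (ta R : List Int) :
    ∀ (L : List (Int × Int)) (nd : PySem.Dict Int Int) (k : Int),
      (L.foldl (fun nd p => calcInner num n p.1 p.2 ta R 1 nd) nd).getD k 0
        = nd.getD k 0 + (L.map (fun p => inSum num n p.1 p.2 ta R 1 k)).sum := by
  intro L
  induction L with
  | nil => intro nd k; simp
  | cons p L ih =>
    intro nd k
    rw [List.foldl_cons, ih, calcInner_getD]
    simp [add_assoc]

theorem foldl_items_keys (num n : Int) (ta R : List Int) (hn : 0 ≤ n) (hR : ∀ x ∈ R, 0 ≤ x) :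
    ∀ (L : List (Int × Int)), (∀ p ∈ L, 0 ≤ p.1) → ∀ (nd : PySem.Dict Int Int),
      (∀ k ∈ nd.keys, 0 ≤ k ∧ k ≤ num) →
      ∀ k ∈ (L.foldl (fun nd p => calcInner num n p.1 p.2 ta R 1 nd) nd).keys, 0 ≤ k ∧ k ≤ num := by
  intro L
  induction L with
  | nil => intro _ nd hnd k hk; exact hnd k hk
  | cons p L ih =>
    intro hL nd hnd k hk
    rw [List.foldl_cons] at hk
    exact ih (fun q hq => hL q (by simp [hq])) _
      (calcInner_keys num n p.1 p.2 ta (hL p (by simp)) hn R hR 1 nd hnd) k hk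

theorem foldl_items_nodup (num n : Int) (ta R : List Int) :
    ∀ (L : List (Int × Int)) (nd : PySem.Dict Int Int), nd.keys.Nodup →
      (L.foldl (fun nd p => calcInner num n p.1 p.2 ta R 1 nd) nd).keys.Nodup := by
  intro L
  induction L with
  | nil => intro nd h; exact h
  | cons p L ih =>
    intro nd h
    rw [List.foldl_cons]
    exact ih _ (calcInner_nodup num n p.1 p.2 ta R 1 nd h)

theorem A_step (num n : Int) (D : PySem.Dict Int Int) (f : Int → Int)
    (hn : 1 ≤ n) (hA : InvA num D f) :
    InvA num (D.items.foldl
        (fun nd p => calcInner num n p.1 p.2 (pascalRow 24) (PySem.List.pyRange 0 25 1) 1 nd)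
        PySem.Dict.empty)
      ((tstep num n)^[24] f) := by
  obtain ⟨hnd, hkeys, hval⟩ := hA
  have hsupp : Supp num f := invA_supp num D f ⟨hnd, hkeys, hval⟩
  have hndfst : (D.items.map Prod.fst).Nodup := by
    simpa [PySem.Dict.keys] using hnd
  have hkeyfold : ∀ k ∈ (D.items.foldl
      (fun nd p => calcInner num n p.1 p.2 (pascalRow 24) (PySem.List.pyRange 0 25 1) 1 nd)
      PySem.Dict.empty).keys, 0 ≤ k ∧ k ≤ num := by
    apply foldl_items_keys num n _ _ (by omega)
      (fun x hx => by rw [PySem.List.mem_pyRange_one] at hx; omega)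
    · intro p hp
      exact (hkeys p.1 (PySem.Dict.mem_keys_of_mem_items D hp)).1
    · intro k hk
      simp [PySem.Dict.keys_empty] at hk
  refine ⟨?_, hkeyfold, ?_⟩
  · exact foldl_items_nodup num n _ _ D.items PySem.Dict.empty PySem.Dict.nodup_keys_empty
  · intro k
    by_cases hkin : 0 ≤ k ∧ k ≤ num
    · rw [foldl_items_getD, PySem.Dict.getD_empty, zero_add]
      have hmap : ∀ p ∈ D.items,
          inSum num n p.1 p.2 (pascalRow 24) (PySem.List.pyRange 0 25 1) 1 k
            = ∑ t ∈ Finset.range 25,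
                (if k = p.1 + n*((0+t:ℕ):Int)
                 then (-1:Int)^(0+t) * p.2 * PySem.List.pyGetD (pascalRow 24) ((0+t:ℕ):Int) 0 else 0) := by
        intro p _
        rw [pyRange025]
        have h1 := inSum_eq num n p.1 p.2 k (pascalRow 24) hn hkin.2 25 0
        rw [pow_zero] at h1
        rw [h1]
      rw [List.map_congr_left hmap, list_sum_finset_sum]
      have hper : ∀ t ∈ Finset.range 25,
          (D.items.map (fun p =>
            (if k = p.1 + n*((0+t:ℕ):Int)
             then (-1:Int)^(0+t) * p.2 * PySem.List.pyGetD (pascalRow 24) ((0+t:ℕ):Int) 0 else 0))).sum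
            = (-1:Int)^t * (Nat.choose 24 t : Int) * f (k - n*(t:ℕ)) := by
        intro t ht
        have hmc : ∀ p ∈ D.items,
            (if k = p.1 + n*((0+t:ℕ):Int)
             then (-1:Int)^(0+t) * p.2 * PySem.List.pyGetD (pascalRow 24) ((0+t:ℕ):Int) 0 else 0)
              = (if p.1 = k - n*((t:ℕ):Int)
                 then ((-1:Int)^t * PySem.List.pyGetD (pascalRow 24) ((t:ℕ):Int) 0) * p.2 else 0) := by
          intro p _
          simp only [Nat.zero_add]
          by_cases h : p.1 = k - n*((t:ℕ):Int)
          · rw [if_pos h, if_pos (by omega)]; ring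
          · rw [if_neg (show ¬ k = p.1 + n*((t:ℕ):Int) by omega), if_neg h]
        have hv' : ∀ p ∈ D.items, p.2 = f p.1 := by
          intro p hp
          rw [← hval p.1]
          exact (PySem.Dict.getD_of_mem_items D (show (p.1, p.2) ∈ D.items from hp) hnd 0).symm
        have hout' : (k - n*((t:ℕ):Int)) ∉ D.items.map Prod.fst → f (k - n*((t:ℕ):Int)) = 0 := by
          intro hc
          rw [← hval (k - n*((t:ℕ):Int))]
          apply PySem.Dict.getD_of_not_contains
          cases hcc : D.contains (k - n*((t:ℕ):Int))
          · rfl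
          · exact absurd ((PySem.Dict.contains_iff_mem_keys D _).mp hcc)
              (by simpa [PySem.Dict.keys] using hc)
        rw [List.map_congr_left hmc,
          sum_key_match f (k - n*((t:ℕ):Int)) _ D.items hndfst hv' hout',
          taChoose t (Finset.mem_range.mp ht)]
      rw [Finset.sum_congr rfl hper,
        binom num n f hsupp hn 24 k hkin.1 hkin.2]
    · have hout : (tstep num n)^[24] f k = 0 :=
        supp_iterate num n f hsupp 24 k (by omega)
      rw [hout]
      apply PySem.Dict.getD_of_not_contains
      cases hcc : PySem.Dict.contains _ k
      · rfl
      · exact absurd (hkeyfold k ((PySem.Dict.contains_iff_mem_keys _ k).mp hcc)) (by omega)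

theorem A_fold (num : Int) :
    ∀ (L : List Int), (∀ x ∈ L, 1 ≤ x) → ∀ (D : PySem.Dict Int Int) (f : Int → Int), InvA num D f →
      InvA num (L.foldl (fun dp n => dp.items.foldl
          (fun nd p => calcInner num n p.1 p.2 (pascalRow 24) (PySem.List.pyRange 0 25 1) 1 nd)
          PySem.Dict.empty) D)
        (L.foldl (fun f n => (tstep num n)^[24] f) f) := by
  intro L
  induction L with
  | nil => intro _ D f h; exact h
  | cons n L ih =>
    intro hL D f h
    rw [List.foldl_cons, List.foldl_cons]
    exact ih (fun x hx => hL x (by simp [hx])) _ _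
      (A_step num n D f (hL n (by simp)) h)

theorem initA (num : Int) (hnum : 0 ≤ num) : InvA num (PySem.Dict.empty.insert 0 1) tDelta := by
  refine ⟨by decide, ?_, ?_⟩
  · have hk : (PySem.Dict.empty.insert (0:Int) (1:Int)).keys = [0] := by decide
    rw [hk]
    intro k hk'
    simp at hk'
    omega
  · intro k
    rw [PySem.Dict.getD_insert]
    simp [tDelta, PySem.Dict.getD_empty]

-- ===== VERDICT =====
theorem calc_py_spec : Claim_equal_calc_py := by
  intro num _
  show calc_py num = calc_py_alt num
  simp only [calc_py, calc_py_alt]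
  by_cases hneg : num < 0
  · rw [if_pos hneg,
      show PySem.List.pyRange 0 (num+1) 1 = [] from PySem.List.pyRange_one_eq_nil (by omega),
      List.map_nil]
  · rw [if_neg hneg]
    have hnum : (0:Int) ≤ num := by omega
    have hlta : PySem.List.len (pascalRow 24) = 25 := by
      rw [ta_eq]; simp [PySem.List.len_eq]
    rw [hlta]
    have hbounds : ∀ x ∈ PySem.List.pyRange 1 (num+1) 1, (1:Int) ≤ x := by
      intro x hx; rw [PySem.List.mem_pyRange_one] at hx; omega
    have hA := A_fold num (PySem.List.pyRange 1 (num+1) 1) hbounds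
      (PySem.Dict.empty.insert 0 1) tDelta (initA num hnum)
    rw [init_list num hnum, B_fold num (PySem.List.pyRange 1 (num+1) 1) hbounds tDelta (supp_tDelta num hnum)]
    exact List.map_congr_left (fun i _ => hA.2.2 i)
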